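-- pv_equiv track=rewrite | github.com/LeonardoF-Andrade/beecrowd | bin.py | contar_grupos_impares
-- ===== SOURCE A (Python) =====
-- def contar_grupos_impares(lista):
--     contador = 0  # Inicializa o contador de grupos ímpares
--     contagem_temporaria = 0  # Inicializa a contagem temporária de 1s em um grupo
--
--     for elemento in lista:
--         if elemento == 1:
--             contagem_temporaria += 1
--         else:
--             # Quando encontramos um 0, verificamos se a contagem temporária é ímpar
--             if contagem_temporaria % 2 != 0:
--                 contador += 1
--             contagem_temporaria = 0  # Zera a contagem temporária para o próximo grupo
--
--     # Verifica se o último grupo termina com um número ímpar de 1s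
--     if contagem_temporaria % 2 != 0:
--         contador += 1
--
--     return contador
-- ===== SOURCE B (Python) =====
-- def contar_grupos_impares(lista):
--     # Alternating-sign summation: within a run of 1s the contributions go
--     # +1, -1, +1, ..., so each maximal run adds exactly (length mod 2).
--     # No run-length counter, no modulo test, no post-loop fixup needed.
--     total = 0
--     sinal = 1
--     for x in lista:
--         if x == 1:
--             total += sinal
--             sinal = -sinal
--         else:
--             sinal = 1
--     return total
-- ===== Notes on version B (the rewrite author's own statement) =====
-- stated objective: alternative
-- what changed: Replaces A's run-length counter with parity test and post-loop fixup by an alternating-sign summation: each 1 adds +1 or -1 alternating within its run (sign resets at a non-1), so every maximal run contributes exactly its length parity and the sum is the answer directly.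
import Mathlib
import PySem

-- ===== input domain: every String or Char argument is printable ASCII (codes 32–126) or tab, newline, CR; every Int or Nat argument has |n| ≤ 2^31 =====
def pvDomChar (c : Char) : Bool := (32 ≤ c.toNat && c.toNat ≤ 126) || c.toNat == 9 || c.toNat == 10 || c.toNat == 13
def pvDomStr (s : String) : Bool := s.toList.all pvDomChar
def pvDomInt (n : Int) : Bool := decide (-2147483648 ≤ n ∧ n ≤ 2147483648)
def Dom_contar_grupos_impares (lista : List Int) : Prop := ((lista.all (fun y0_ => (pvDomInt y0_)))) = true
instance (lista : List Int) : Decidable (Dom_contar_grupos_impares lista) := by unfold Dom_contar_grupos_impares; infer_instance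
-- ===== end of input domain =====

-- B replaces A's run-length counter + parity test + post-loop fixup with an
-- alternating-sign summation (each 1 adds +1/-1 alternating within its run).

-- ===== PORT A =====
-- loop body of A: state = (contador, contagem_temporaria)
def pvStepA (st : Int × Int) (elemento : Int) : Int × Int :=
  if elemento == 1 then (st.1, st.2 + 1)
  else (if st.2 % 2 != 0 then st.1 + 1 else st.1, 0)

def contar_grupos_impares (lista : List Int) : Int :=
  let s := lista.foldl pvStepA (0, 0)
  if s.2 % 2 != 0 then s.1 + 1 else s.1

-- ===== PORT B =====
-- loop body of B: state = (total, sinal)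
def pvStepB (st : Int × Int) (x : Int) : Int × Int :=
  if x == 1 then (st.1 + st.2, -st.2) else (st.1, 1)

def contar_grupos_impares_alt (lista : List Int) : Int :=
  (lista.foldl pvStepB (0, 1)).1

-- ===== PRECONDITION & SPEC =====
def Spec_contar_grupos_impares (lista : List Int) (out : Int) : Prop := out = contar_grupos_impares_alt lista
instance (lista : List Int) (out : Int) : Decidable (Spec_contar_grupos_impares lista out) := by unfold Spec_contar_grupos_impares; infer_instance

-- ===== CLAIM (what is proved, stated in full; the proofs are below) =====
def Claim_equal_contar_grupos_impares : Prop := ∀ (lista : List Int), Dom_contar_grupos_impares lista → Spec_contar_grupos_impares lista (contar_grupos_impares lista)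

-- ===== LEMMAS AND PROOFS =====

-- invariant linking the two loop states: if A's pending state is (c, n) then
-- B's state is (c + n % 2, (-1)^n), and the final answers agree.
lemma pv_loop_eq : ∀ (xs : List Int) (c : Int) (n : ℕ),
    (xs.foldl pvStepB (c + ((n : Int)) % 2, if n % 2 = 0 then 1 else -1)).1
      = (if (xs.foldl pvStepA (c, (n : Int))).2 % 2 != 0
          then (xs.foldl pvStepA (c, (n : Int))).1 + 1
          else (xs.foldl pvStepA (c, (n : Int))).1) := by
  intro xs
  induction xs with
  | nil =>
    intro c n
    simp only [List.foldl_nil]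
    by_cases h : n % 2 = 0
    · have h1 : ((n : Int)) % 2 = 0 := by omega
      have h2 : ¬ (((n : Int)) % 2 != 0) := by simp [h1]
      simp [h1]
    · have h1 : ((n : Int)) % 2 = 1 := by omega
      have h2 : ((n : Int)) % 2 != 0 := by simp [h1]
      simp [h1]
  | cons x xs ih =>
    intro c n
    rw [List.foldl_cons, List.foldl_cons]
    by_cases hx : x = 1
    · subst hx
      have hA : pvStepA (c, (n : Int)) 1 = (c, ((n + 1 : ℕ) : Int)) := by
        simp [pvStepA]
      have hB : pvStepB (c + ((n : Int)) % 2, if n % 2 = 0 then 1 else -1) 1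
          = (c + (((n + 1 : ℕ) : Int)) % 2, if (n + 1) % 2 = 0 then 1 else -1) := by
        by_cases h : n % 2 = 0
        · have h2 : (n + 1) % 2 ≠ 0 := by omega
          simp only [pvStepB, BEq.rfl, if_true, if_pos h, if_neg h2]
          refine congrArg₂ Prod.mk ?_ rfl
          push_cast
          omega
        · have h2 : (n + 1) % 2 = 0 := by omega
          simp only [pvStepB, BEq.rfl, if_true, if_neg h, if_pos h2]
          refine congrArg₂ Prod.mk ?_ (by ring)
          push_cast
          omega
      rw [hA, hB, ih c (n + 1)]
    · have hk : (x == 1) = false := by simp [hx]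
      by_cases h : n % 2 = 0
      · have h1 : ((n : Int)) % 2 = 0 := by omega
        have hA : pvStepA (c, (n : Int)) x = (c, ((0 : ℕ) : Int)) := by
          simp [pvStepA, hk, h1]
        rw [hA, ← ih c 0]
        simp [pvStepB, hk, h1]
      · have h1 : ((n : Int)) % 2 = 1 := by omega
        have hA : pvStepA (c, (n : Int)) x = (c + 1, ((0 : ℕ) : Int)) := by
          simp [pvStepA, hk, h1]
        rw [hA, ← ih (c + 1) 0]
        simp [pvStepB, hk, h1]

-- ===== VERDICT (by name: the statement is the Claim_ definition above) =====
theorem contar_grupos_impares_spec : Claim_equal_contar_grupos_impares := by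
  intro lista _
  show contar_grupos_impares lista = contar_grupos_impares_alt lista
  have h := pv_loop_eq lista 0 0
  simpa [contar_grupos_impares, contar_grupos_impares_alt] using h.symm
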